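-- pv_equiv track=rewrite | github.com/ASJoaoVictor/Programa-o-estruturada | aula_09/exercicios/ex_08.py | buyDay
-- ===== SOURCE A (Python) =====
-- def buyDay(lista):
--     menorPrice = lista[0]
--     dia = 1
--     for i, price in enumerate(lista, 1):
--         if price < menorPrice:
--             menorPrice = price
--             dia = i
--
--     return dia, menorPrice
-- ===== SOURCE B (Python) =====
-- def buyDay(lista):
--     menorPrice = min(lista)
--     dia = lista.index(menorPrice) + 1
--     return dia, menorPrice
-- ===== Notes on version B (the rewrite author's own statement) =====
-- stated objective: idiomatic
-- what changed: Replaces A's single accumulator loop by two staged library passes: min(lista) computes the minimum value, then lista.index locates its first occurrence for the 1-based day.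
import Mathlib
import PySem

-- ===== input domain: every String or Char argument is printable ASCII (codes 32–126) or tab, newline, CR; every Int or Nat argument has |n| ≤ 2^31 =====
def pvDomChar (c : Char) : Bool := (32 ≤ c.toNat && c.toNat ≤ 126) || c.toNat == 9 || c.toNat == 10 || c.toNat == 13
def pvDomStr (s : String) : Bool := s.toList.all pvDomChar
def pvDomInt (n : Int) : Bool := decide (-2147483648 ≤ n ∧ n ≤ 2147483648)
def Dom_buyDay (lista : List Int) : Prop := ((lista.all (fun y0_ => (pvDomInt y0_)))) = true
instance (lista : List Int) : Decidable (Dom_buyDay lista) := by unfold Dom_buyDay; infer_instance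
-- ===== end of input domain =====

-- B replaces A's single accumulator loop with two staged library passes: min(lista), then lista.index (idiomatic).

-- ===== PORT A =====
def buyDay (lista : List Int) : Int × Int :=
  match PySem.List.pyGet? lista 0 with
  | none => (0, 0)      -- IndexError: excluded by Pre_buyDay
  | some first =>
    let st := (PySem.List.enumerate lista 1).foldl
      (fun (st : Int × Int) iv => if iv.2 < st.1 then (iv.2, iv.1) else st)
      (first, 1)        -- state = (menorPrice, dia)
    (st.2, st.1)

-- ===== PORT B =====
def buyDay_alt (lista : List Int) : Int × Int :=
  match PySem.List.min? lista (fun x => x) with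
  | none => (0, 0)      -- ValueError on empty list: excluded by Pre_buyDay
  | some menorPrice =>
    match PySem.List.index? lista menorPrice with
    | some i => ((i : Int) + 1, menorPrice)
    | none => (0, 0)    -- unreachable: min is a member of the list

-- ===== PRECONDITION & SPEC =====
-- Pre_ excludes the empty list, on which the Python A raises IndexError (lista[0]).
def Pre_buyDay (lista : List Int) : Prop := lista ≠ []
instance (lista : List Int) : Decidable (Pre_buyDay lista) := by unfold Pre_buyDay; infer_instance
def pvWitness_buyDay : List Int := ([5, 3, 4] : List Int)

def Spec_buyDay (lista : List Int) (out : Int × Int) : Prop := out = buyDay_alt lista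
instance (lista : List Int) (out : Int × Int) : Decidable (Spec_buyDay lista out) := by unfold Spec_buyDay; infer_instance

-- ===== CLAIM (what is proved, stated in full; the proofs are below) =====
def Claim_equal_buyDay : Prop := ∀ (lista : List Int), Dom_buyDay lista → Pre_buyDay lista → Spec_buyDay lista (buyDay lista)

-- ===== LEMMAS AND PROOFS =====

-- folding min starting from (min a b) pulls a out front
theorem foldl_min_min (s : List Int) : ∀ (a b : Int),
    s.foldl min (min a b) = min a (s.foldl min b) := by
  induction s with
  | nil => intro a b; rfl
  | cons y t ih =>
    intro a b
    simp only [List.foldl_cons, min_assoc, ih]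

-- A's accumulator loop computes the minimum and the 1-based position of its first occurrence.
theorem loop_char (t : List Int) : ∀ (m d k : Int),
    (PySem.List.enumerate t k).foldl
      (fun (st : Int × Int) iv => if iv.2 < st.1 then (iv.2, iv.1) else st) (m, d)
    = match PySem.List.min? t (fun x => x) with
      | none => (m, d)
      | some mt =>
        if mt < m then (mt, k + (((PySem.List.index? t mt).getD 0 : Nat) : Int)) else (m, d) := by
  induction t with
  | nil => intro m d k; simp [PySem.List.min?]
  | cons x r ih =>
    intro m d k
    rw [PySem.List.enumerate_cons, List.foldl_cons]
    have hmin : PySem.List.min? (x :: r) (fun y => y) = some (r.foldl min x) :=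
      PySem.List.min?_id_cons ..
    rw [hmin]
    rcases r with _ | ⟨y, s⟩
    · -- r = []
      by_cases hx : x < m <;>
        simp [hx]
    · -- r = y :: s
      have hminr : PySem.List.min? (y :: s) (fun z => z) = some (s.foldl min y) :=
        PySem.List.min?_id_cons ..
      set mr := s.foldl min y with hmr
      have hmem : mr ∈ y :: s := PySem.List.min?_mem hminr
      obtain ⟨j, hj⟩ : ∃ j, PySem.List.index? (y :: s) mr = some j := by
        have := (PySem.List.index?_isSome_iff (y :: s) mr).mpr hmem
        exact Option.isSome_iff_exists.mp this
      have hfold : s.foldl min (min x y) = min x mr := by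
        rw [foldl_min_min, hmr]
      simp only [List.foldl_cons, hfold]
      by_cases hx : x < m
      · -- first element updates the state to (x, k)
        rw [if_pos hx, ih x k (k + 1), hminr]
        by_cases hmx : mr < x
        · have hne : x ≠ mr := by omega
          have hidx : PySem.List.index? (x :: y :: s) mr = some (j + 1) := by
            rw [PySem.List.index?_cons_of_ne _ hne, hj]; rfl
          rw [if_pos (by omega : min x mr < m)]
          simp only [if_pos hmx]
          rw [min_eq_right (le_of_lt hmx), hidx, hj]
          simp; omega
        · have hminx : min x mr = x := min_eq_left (by omega)
          rw [if_pos (by omega : min x mr < m)]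
          simp only [if_neg hmx]
          rw [hminx, PySem.List.index?_cons_self]
          simp
      · -- first element leaves (m, d)
        rw [if_neg hx, ih m d (k + 1), hminr]
        by_cases hmm : mr < m
        · have hmx : mr < x := by omega
          have hne : x ≠ mr := by omega
          have hidx : PySem.List.index? (x :: y :: s) mr = some (j + 1) := by
            rw [PySem.List.index?_cons_of_ne _ hne, hj]; rfl
          rw [if_pos (by omega : min x mr < m)]
          simp only [if_pos hmm]
          rw [min_eq_right (le_of_lt hmx), hidx, hj]
          simp; omega
        · have : ¬ min x mr < m := by
            rcases min_cases x mr with ⟨h1, _⟩ | ⟨h1, _⟩ <;> omega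
          rw [if_neg this]
          simp only [if_neg hmm]

-- ===== VERDICT (by name: the statement is the Claim_ definition above) =====
theorem buyDay_spec : Claim_equal_buyDay := by
  intro lista _ hpre
  unfold Spec_buyDay buyDay buyDay_alt
  match lista with
  | [] => exact absurd rfl hpre
  | x :: t =>
    have hmin : PySem.List.min? (x :: t) (fun y => y) = some (t.foldl min x) :=
      PySem.List.min?_id_cons ..
    simp only [PySem.List.pyGet?_zero_cons, loop_char, hmin]
    set mt := t.foldl min x with hmt
    have hle : mt ≤ x := by
      rcases t with _ | ⟨y, s⟩
      · simp [hmt]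
      · simp only [hmt, List.foldl_cons]
        calc List.foldl min (min x y) s = min x (List.foldl min y s) := foldl_min_min ..
          _ ≤ x := min_le_left ..
    by_cases hlt : mt < x
    · have hmem : mt ∈ x :: t := PySem.List.min?_mem hmin
      have hne : x ≠ mt := by omega
      have hmem' : mt ∈ t := by
        rcases List.mem_cons.mp hmem with h | h
        · omega
        · exact h
      obtain ⟨j, hj⟩ : ∃ j, PySem.List.index? t mt = some j :=
        Option.isSome_iff_exists.mp ((PySem.List.index?_isSome_iff t mt).mpr hmem')
      have hidx : PySem.List.index? (x :: t) mt = some (j + 1) := by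
        rw [PySem.List.index?_cons_of_ne _ hne, hj]; rfl
      rw [hidx]
      simp only [if_pos hlt]
      simp
      omega
    · have hxe : mt = x := by omega
      rw [hxe, PySem.List.index?_cons_self]
      simp
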